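-- pv_equiv track=rewrite | github.com/AdrianHagen/irrs-lab1 | lab1-raco/exercise4_heaps_law.py | calculate_vocabulary_growth
-- ===== SOURCE A (Python) =====
-- def calculate_vocabulary_growth(tokens, step_size=500):
--     """
--     Calculate vocabulary size at different text lengths.
--
--     Args:
--         tokens: List of preprocessed tokens
--         step_size: How often to sample vocabulary size
--
--     Returns:
--         text_lengths: List of text lengths (N values)
--         vocab_sizes: List of vocabulary sizes (d values)
--     """
--     text_lengths = []
--     vocab_sizes = []
--     seen_words = set()
--
--     for i in range(step_size, len(tokens) + 1, step_size):
--         chunk = tokens[:i]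
--         seen_words.update(chunk)
--
--         text_lengths.append(i)
--         vocab_sizes.append(len(seen_words))
--
--     if len(tokens) not in text_lengths:
--         seen_words = set(tokens)
--         text_lengths.append(len(tokens))
--         vocab_sizes.append(len(seen_words))
--
--     return text_lengths, vocab_sizes
-- ===== SOURCE B (Python) =====
-- def calculate_vocabulary_growth(tokens, step_size=500):
--     n = len(tokens)
--     # one pass: cum[j] = vocabulary size of tokens[:j]
--     cum = [0]
--     seen = set()
--     for t in tokens:
--         seen.add(t)
--         cum.append(len(seen))
--     text_lengths = list(range(step_size, n + 1, step_size))
--     vocab_sizes = [cum[i] for i in text_lengths]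
--     if n not in text_lengths:
--         text_lengths.append(n)
--         vocab_sizes.append(cum[n])
--     return text_lengths, vocab_sizes
-- ===== Notes on version B (the rewrite author's own statement) =====
-- stated objective: alternative
-- what changed: B builds a cumulative vocabulary-size table in one pass over the tokens and answers each sample point by indexing it, instead of A's re-scanning the whole prefix tokens[:i] at every sample point; asymptotically O(n) vs A's O(n^2/step), but A's C-level slice/update makes the measured times comparable.
import Mathlib
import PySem

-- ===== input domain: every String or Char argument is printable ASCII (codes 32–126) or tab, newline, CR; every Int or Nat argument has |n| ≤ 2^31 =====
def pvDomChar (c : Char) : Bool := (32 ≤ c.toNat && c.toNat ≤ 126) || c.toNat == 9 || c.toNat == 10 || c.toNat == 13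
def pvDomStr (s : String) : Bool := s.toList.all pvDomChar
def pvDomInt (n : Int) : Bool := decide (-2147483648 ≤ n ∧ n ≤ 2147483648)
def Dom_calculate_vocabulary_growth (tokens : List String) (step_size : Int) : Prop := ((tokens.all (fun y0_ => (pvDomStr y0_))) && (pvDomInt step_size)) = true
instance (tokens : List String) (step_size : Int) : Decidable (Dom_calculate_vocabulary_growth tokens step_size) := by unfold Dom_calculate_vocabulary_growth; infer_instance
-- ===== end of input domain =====

-- B replaces A's per-sample rescans of the whole prefix by one cumulative
-- vocabulary-size table built in a single pass, then indexed (objective: alternative).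

-- ===== PORT A =====
def calculate_vocabulary_growth (tokens : List String) (step_size : Int) : List Int × List Int :=
  -- text_lengths = []; vocab_sizes = []; seen_words = set()
  -- for i in range(step_size, len(tokens)+1, step_size): chunk = tokens[:i]; seen_words.update(chunk); append i; append len(seen_words)
  let st := (PySem.List.pyRange step_size ((tokens.length : Int) + 1) step_size).foldl
    (fun (st : List Int × List Int × PySem.Set String) i =>
      let chunk := PySem.List.slice tokens none (some i)
      let seen := PySem.Set.update st.2.2 chunk
      (st.1 ++ [i], st.2.1 ++ [PySem.Set.len seen], seen))
    ([], [], PySem.Set.empty)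
  -- if len(tokens) not in text_lengths: append len(tokens); append len(set(tokens))
  if (tokens.length : Int) ∈ st.1 then (st.1, st.2.1)
  else (st.1 ++ [(tokens.length : Int)], st.2.1 ++ [PySem.Set.len (PySem.Set.ofList tokens)])

-- ===== PORT B =====
def calculate_vocabulary_growth_alt (tokens : List String) (step_size : Int) : List Int × List Int :=
  let n : Int := tokens.length
  -- cum = [0]; seen = set(); for t in tokens: seen.add(t); cum.append(len(seen))
  let cs := tokens.foldl
    (fun (st : List Int × PySem.Set String) t =>
      let seen := PySem.Set.add st.2 t
      (st.1 ++ [PySem.Set.len seen], seen))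
    ([0], PySem.Set.empty)
  let cum := cs.1
  let tl := PySem.List.pyRange step_size (n + 1) step_size
  -- cum[i] is always in range here, so the total pyGetD is exact
  let vs := tl.map (fun i => PySem.List.pyGetD cum i 0)
  if n ∈ tl then (tl, vs) else (tl ++ [n], vs ++ [PySem.List.pyGetD cum n 0])

-- ===== PRECONDITION & SPEC =====
-- Pre_ excludes only step_size = 0, where Python's range raises ValueError (in both A and B).
def Pre_calculate_vocabulary_growth (tokens : List String) (step_size : Int) : Prop := step_size ≠ 0
instance (tokens : List String) (step_size : Int) : Decidable (Pre_calculate_vocabulary_growth tokens step_size) := by unfold Pre_calculate_vocabulary_growth; infer_instance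
def pvWitness_calculate_vocabulary_growth : List String × Int := (["a", "b", "a"], 2)

def Spec_calculate_vocabulary_growth (tokens : List String) (step_size : Int) (out : List Int × List Int) : Prop := out = calculate_vocabulary_growth_alt tokens step_size
instance (tokens : List String) (step_size : Int) (out : List Int × List Int) : Decidable (Spec_calculate_vocabulary_growth tokens step_size out) := by unfold Spec_calculate_vocabulary_growth; infer_instance

-- ===== CLAIM (what is proved, stated in full; the proofs are below) =====
def Claim_equal_calculate_vocabulary_growth : Prop := ∀ (tokens : List String) (step_size : Int), Dom_calculate_vocabulary_growth tokens step_size → Pre_calculate_vocabulary_growth tokens step_size → Spec_calculate_vocabulary_growth tokens step_size (calculate_vocabulary_growth tokens step_size)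

-- ===== LEMMAS AND PROOFS =====

-- vocabulary size of the prefix of length k
def cumVal (tokens : List String) (k : Nat) : Int :=
  PySem.Set.len (PySem.Set.ofList (tokens.take k))

theorem update_of_subset {α : Type} [BEq α] [LawfulBEq α] (s : PySem.Set α) (xs : List α)
    (h : ∀ x ∈ xs, x ∈ s) : PySem.Set.update s xs = s := by
  induction xs generalizing s with
  | nil => rfl
  | cons x xs ih =>
    rw [PySem.Set.update_cons, PySem.Set.add_of_mem (h x (by simp))]
    exact ih s (fun y hy => h y (by simp [hy]))

theorem update_ofList_self_append {α : Type} [BEq α] [LawfulBEq α] (xs ys : List α) :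
    PySem.Set.update (PySem.Set.ofList xs) (xs ++ ys) = PySem.Set.ofList (xs ++ ys) := by
  rw [PySem.Set.update_append,
      update_of_subset _ xs (fun x hx => (PySem.Set.mem_ofList xs x).mpr hx),
      PySem.Set.ofList_append]

theorem update_take_take {α : Type} [BEq α] [LawfulBEq α] (l : List α) {p q : Nat} (h : p ≤ q) :
    PySem.Set.update (PySem.Set.ofList (l.take p)) (l.take q) = PySem.Set.ofList (l.take q) := by
  have h1 : (l.take q).take p = l.take p := by rw [List.take_take, Nat.min_eq_left h]
  have h2 := update_ofList_self_append ((l.take q).take p) ((l.take q).drop p)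
  rw [List.take_append_drop] at h2
  rwa [h1] at h2

-- characterisation of B's cumulative table
theorem cum_fold (ts : List String) :
    ∀ (acc : List Int) (pre : List String),
    ts.foldl (fun (st : List Int × PySem.Set String) t =>
        (st.1 ++ [PySem.Set.len (PySem.Set.add st.2 t)], PySem.Set.add st.2 t))
      (acc, PySem.Set.ofList pre)
    = (acc ++ (List.range ts.length).map
          (fun k => PySem.Set.len (PySem.Set.ofList (pre ++ ts.take (k+1)))),
       PySem.Set.ofList (pre ++ ts)) := by
  induction ts with
  | nil => simp
  | cons t ts ih =>
    intro acc pre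
    have hadd : PySem.Set.add (PySem.Set.ofList pre) t = PySem.Set.ofList (pre ++ [t]) :=
      (PySem.Set.ofList_append_singleton pre t).symm
    simp only [List.foldl_cons, hadd]
    rw [ih (acc ++ [PySem.Set.len (PySem.Set.ofList (pre ++ [t]))]) (pre ++ [t])]
    rw [Prod.mk.injEq]
    constructor
    · rw [List.length_cons, List.range_succ_eq_map, List.map_cons, List.map_map]
      simp only [List.take_succ_cons, List.take_zero]
      rw [List.append_assoc]
      congr 1
      simp only [List.singleton_append, List.cons.injEq, true_and]
      apply List.map_congr_left
      intro k _
      simp [Function.comp, List.append_assoc]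
    · simp [List.append_assoc]

-- B's cum list
theorem cum_eq (tokens : List String) :
    (tokens.foldl (fun (st : List Int × PySem.Set String) t =>
        (st.1 ++ [PySem.Set.len (PySem.Set.add st.2 t)], PySem.Set.add st.2 t))
      ([0], PySem.Set.empty)).1
    = (List.range (tokens.length + 1)).map (cumVal tokens) := by
  have h := cum_fold tokens [0] []
  simp only [List.nil_append] at h
  rw [show (PySem.Set.empty : PySem.Set String) = PySem.Set.ofList [] from rfl, h]
  rw [List.range_succ_eq_map, List.map_cons, List.map_map]
  have h0 : cumVal tokens 0 = 0 := rfl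
  rw [← h0]
  simp [cumVal, Function.comp]

theorem cum_getD (tokens : List String) {i : Int} (h0 : 0 ≤ i) (hn : i ≤ (tokens.length : Int)) :
    PySem.List.pyGetD ((List.range (tokens.length + 1)).map (cumVal tokens)) i 0
      = cumVal tokens i.toNat := by
  rw [PySem.List.pyGetD_of_nonneg _ _ h0]
  exact PySem.List.getD_map_range (cumVal tokens) _ _ _ (by omega)

-- A's loop over an ascending index list
theorem a_loop (tokens : List String) :
    ∀ (r : List Int) (tl vs : List Int) (p : Nat),
    List.IsChain (· ≤ ·) ((p : Int) :: r) →
    ∃ s, r.foldl (fun (st : List Int × List Int × PySem.Set String) i =>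
        (st.1 ++ [i],
         st.2.1 ++ [PySem.Set.len (PySem.Set.update st.2.2 (PySem.List.slice tokens none (some i)))],
         PySem.Set.update st.2.2 (PySem.List.slice tokens none (some i))))
      (tl, vs, PySem.Set.ofList (tokens.take p))
    = (tl ++ r, vs ++ r.map (fun i => cumVal tokens i.toNat), s) := by
  intro r
  induction r with
  | nil =>
    intro tl vs p _
    exact ⟨PySem.Set.ofList (tokens.take p), by simp⟩
  | cons i r ih =>
    intro tl vs p hch
    have hpi : (p : Int) ≤ i := (List.isChain_cons_cons.mp hch).1
    have hchi : List.IsChain (· ≤ ·) (i :: r) := (List.isChain_cons_cons.mp hch).2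
    have hi0 : (0 : Int) ≤ i := le_trans (Int.natCast_nonneg p) hpi
    have hslice : PySem.List.slice tokens none (some i) = tokens.take i.toNat :=
      PySem.List.slice_to tokens hi0
    have hup : PySem.Set.update (PySem.Set.ofList (tokens.take p)) (tokens.take i.toNat)
        = PySem.Set.ofList (tokens.take i.toNat) :=
      update_take_take tokens (by omega)
    have hch' : List.IsChain (· ≤ ·) (((i.toNat : Int)) :: r) := by
      rwa [Int.toNat_of_nonneg hi0]
    obtain ⟨s, hs⟩ := ih (tl ++ [i]) (vs ++ [cumVal tokens i.toNat]) i.toNat hch'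
    refine ⟨s, ?_⟩
    simp only [List.foldl_cons, hslice, hup]
    simp only [cumVal] at hs ⊢
    rw [hs]
    simp

-- a pyRange with positive step is a (· ≤ ·)-chain after any c ≤ its start
theorem chain_map_range (ss : Int) (hss : 0 < ss) :
    ∀ (m : Nat) (c base : Int), c ≤ base →
    List.IsChain (· ≤ ·) (c :: (List.range m).map (fun k : Nat => base + ss * (k : Int))) := by
  intro m
  induction m with
  | zero => intro c base _; simp
  | succ m ih =>
    intro c base hcb
    rw [List.range_succ_eq_map, List.map_cons, List.map_map]
    rw [List.isChain_cons_cons]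
    refine ⟨by simpa using hcb, ?_⟩
    have heq : (List.map ((fun k : Nat => base + ss * (k : Int)) ∘ Nat.succ) (List.range m))
        = (List.range m).map (fun k : Nat => (base + ss) + ss * (k : Int)) := by
      apply List.map_congr_left; intro k _; simp [Function.comp]; ring
    rw [heq]
    simpa using ih base (base + ss) (by omega)

theorem pyRange_neg_empty (a b s : Int) (hs : s < 0) (hab : a ≤ b) :
    PySem.List.pyRange a b s = [] := by
  simp only [PySem.List.pyRange]
  rw [if_neg (by omega), if_neg (by omega), if_neg (by omega)]
  simp

-- ===== VERDICT (by name: the statement is the Claim_ definition above) =====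
theorem calculate_vocabulary_growth_spec : Claim_equal_calculate_vocabulary_growth := by
  intro tokens step_size _ hpre
  unfold Spec_calculate_vocabulary_growth calculate_vocabulary_growth calculate_vocabulary_growth_alt
  simp only []
  set n : Int := (tokens.length : Int) with hn
  rw [cum_eq tokens]
  rcases lt_or_gt_of_ne hpre with hneg | hpos
  · -- negative step: empty range
    rw [pyRange_neg_empty _ _ _ hneg (by omega)]
    simp only [List.foldl_nil, List.map_nil, List.not_mem_nil, if_false]
    rw [cum_getD tokens (i := n) (by omega) (by omega)]
    have hfull : cumVal tokens n.toNat = PySem.Set.len (PySem.Set.ofList tokens) := by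
      simp [cumVal, hn]
    rw [hfull]
  · -- positive step
    set r := PySem.List.pyRange step_size (n + 1) step_size with hr
    have hch : List.IsChain (· ≤ ·) (((0 : Nat) : Int) :: r) := by
      rw [hr, PySem.List.pyRange_of_pos _ _ hpos]
      exact chain_map_range step_size hpos _ _ _ (by omega)
    obtain ⟨s, hs⟩ := a_loop tokens r [] [] 0 hch
    rw [show PySem.Set.ofList (tokens.take 0) = (PySem.Set.empty : PySem.Set String) from rfl] at hs
    rw [hs]
    simp only [List.nil_append]
    have hmap : r.map (fun i => PySem.List.pyGetD ((List.range (tokens.length + 1)).map (cumVal tokens)) i 0)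
        = r.map (fun i => cumVal tokens i.toNat) := by
      apply List.map_congr_left
      intro i hi
      have hmem := (PySem.List.mem_pyRange_iff_of_pos hpos i).mp (hr ▸ hi)
      exact cum_getD tokens (by omega) (by omega)
    rw [hmap]
    by_cases hmem : n ∈ r
    · simp [hmem]
    · simp only [hmem, if_false]
      rw [cum_getD tokens (i := n) (by omega) (by omega)]
      have hfull : cumVal tokens n.toNat = PySem.Set.len (PySem.Set.ofList tokens) := by
        simp [cumVal, hn]
      rw [hfull]
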